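-- pv_equiv track=rewrite | github.com/vytr09/Sigma-automation | attack_convert/utils/parser.py | prioritize_command
-- ===== SOURCE A (Python) =====
-- def prioritize_command(commands: list[str]) -> str:
--     danger_keywords = [
--         "add-printerport", "downloadstring", "downloadfile",
--         "powershell", "netsh", "reg", "cmd", "wmic", "schtasks", "rundll32",
--         "mshta", "taskkill", "java", "cscript", "bypass", "encodedcommand",
--         "debug", "service", "url", "remote", "exe", "dll", "start", "create"
--     ]
--     if not commands:
--         return ""
--     priority_cmds = [cmd for cmd in commands if any(kw in cmd.lower() for kw in danger_keywords)]
--     return max(priority_cmds, key=len) if priority_cmds else max(commands, key=len)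
-- ===== SOURCE B (Python) =====
-- def prioritize_command(commands: list[str]) -> str:
--     danger_keywords = [
--         "add-printerport", "downloadstring", "downloadfile",
--         "powershell", "netsh", "reg", "cmd", "wmic", "schtasks", "rundll32",
--         "mshta", "taskkill", "java", "cscript", "bypass", "encodedcommand",
--         "debug", "service", "url", "remote", "exe", "dll", "start", "create"
--     ]
--     ordered = sorted(commands, key=len, reverse=True)
--     for cmd in ordered:
--         if any(kw in cmd.lower() for kw in danger_keywords):
--             return cmd
--     return ordered[0] if ordered else ""
-- ===== Notes on version B (the rewrite author's own statement) =====
-- stated objective: alternative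
-- what changed: Replaces A's filter-then-max(key=len) with a stable descending sort by length followed by a scan that returns the first danger command (else the first, i.e. longest, element), trading the max passes for sort-then-scan.
import Mathlib
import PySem

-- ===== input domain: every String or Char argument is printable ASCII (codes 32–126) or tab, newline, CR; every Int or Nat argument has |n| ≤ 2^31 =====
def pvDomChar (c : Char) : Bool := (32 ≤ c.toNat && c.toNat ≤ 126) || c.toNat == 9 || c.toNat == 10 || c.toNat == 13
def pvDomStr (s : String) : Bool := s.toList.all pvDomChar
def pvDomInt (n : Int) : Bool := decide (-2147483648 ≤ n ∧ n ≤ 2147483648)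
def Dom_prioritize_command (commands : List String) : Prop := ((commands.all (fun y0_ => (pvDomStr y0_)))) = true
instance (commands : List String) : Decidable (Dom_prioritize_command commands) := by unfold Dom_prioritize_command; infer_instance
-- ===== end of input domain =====

-- B replaces A's filter-then-max(key=len) by a stable descending sort by length and a scan for the first danger command (alternative algorithm, similar cost).

-- shared constant data: the danger keyword list both Pythons spell out literally
def pvDangerKeywords : List String := [
  "add-printerport", "downloadstring", "downloadfile",
  "powershell", "netsh", "reg", "cmd", "wmic", "schtasks", "rundll32",
  "mshta", "taskkill", "java", "cscript", "bypass", "encodedcommand",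
  "debug", "service", "url", "remote", "exe", "dll", "start", "create"]

-- the danger test 'any(kw in cmd.lower() for kw in danger_keywords)', shared by both ports
def pvIsD (cmd : String) : Bool :=
  pvDangerKeywords.any (fun kw => PySem.Str.isIn kw (PySem.Str.lower cmd))

-- ===== PORT A =====
-- max(xs, key=len) → PySem.List.max? xs PySem.Str.len; '.getD ""' is only reached when the list is nonempty, where max? = some _.
def prioritize_command (commands : List String) : String :=
  if commands = [] then ""
  else
    let priority_cmds := commands.filter pvIsD
    if priority_cmds ≠ [] then (PySem.List.max? priority_cmds PySem.Str.len).getD ""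
    else (PySem.List.max? commands PySem.Str.len).getD ""

-- ===== PORT B =====
-- sorted(commands, key=len, reverse=True) → PySem.List.sorted … true (stable);
-- the 'for … return' loop is the first element satisfying the danger test → List.find?;
-- 'ordered[0] if ordered else ""' → match on ordered.
def prioritize_command_alt (commands : List String) : String :=
  let ordered := PySem.List.sorted commands PySem.Str.len true
  match ordered.find? pvIsD with
  | some cmd => cmd
  | none =>
    match ordered with
    | [] => ""
    | c :: _ => c

-- ===== PRECONDITION & SPEC =====
def Spec_prioritize_command (commands : List String) (out : String) : Prop := out = prioritize_command_alt commands
instance (commands : List String) (out : String) : Decidable (Spec_prioritize_command commands out) := by unfold Spec_prioritize_command; infer_instance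

-- ===== CLAIM (what is proved, stated in full; the proofs are below) =====
def Claim_equal_prioritize_command : Prop := ∀ (commands : List String), Dom_prioritize_command commands → Spec_prioritize_command commands (prioritize_command commands)

-- ===== LEMMAS AND PROOFS =====

-- insertBy's cons unfolding, named for rewriting
lemma pvInsertBy_cons (b : String → String → Bool) (x y : String) (ys : List String) :
    PySem.List.insertBy b x (y :: ys)
      = if b x y then x :: y :: ys else y :: PySem.List.insertBy b x ys := rfl

-- inserting x into a length-descending list: the first p-element of the result,
-- phrased via the first p-element of the old list
lemma pvFind?_insertBy (p : String → Bool) (x : String) :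
    ∀ (s : List String), s.Pairwise (fun a b => PySem.Str.len b ≤ PySem.Str.len a) →
    List.find? p (PySem.List.insertBy (fun a b => decide (PySem.Str.len b < PySem.Str.len a)) x s) =
      match List.find? p s with
      | some m => if PySem.Str.len x ≤ PySem.Str.len m then some m
                  else if p x then some x else some m
      | none => if p x then some x else none := by
  intro s
  induction s with
  | nil =>
    intro _
    simp [PySem.List.insertBy, List.find?]
  | cons y ys ih =>
    intro hs
    rw [List.pairwise_cons] at hs
    rw [pvInsertBy_cons]
    by_cases hxy : PySem.Str.len y < PySem.Str.len x
    · rw [if_pos (decide_eq_true hxy)]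
      rcases hf : List.find? p (y :: ys) with _ | m
      · cases hpx : p x <;> simp [hpx, hf]
      · have hm : m ∈ y :: ys := List.mem_of_find?_eq_some hf
        have hmy : m.length ≤ y.length := by
          rcases List.mem_cons.mp hm with h | h
          · exact le_of_eq (by rw [h])
          · simpa using hs.1 m h
        have hxy' : y.length < x.length := by simpa using hxy
        have hnle : ¬ x.length ≤ m.length := by omega
        cases hpx : p x <;> simp [hpx, hf, hnle]
    · rw [if_neg (by simpa using hxy)]
      rcases hpy : p y with _ | _
      · rw [List.find?_cons_of_neg (by simp [hpy]), List.find?_cons_of_neg (by simp [hpy])]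
        exact ih hs.2
      · rw [List.find?_cons_of_pos hpy, List.find?_cons_of_pos hpy]
        have hxy' : x.length ≤ y.length := by simpa using le_of_not_gt hxy
        simp [hxy']

-- the first p-element of the length-descending stable sort IS max(filter(p, xs), key=len)
lemma pvFind?_sortedRev (p : String → Bool) (xs : List String) :
    List.find? p (PySem.List.sorted xs PySem.Str.len true) =
      PySem.List.max? (xs.filter p) PySem.Str.len := by
  induction xs using List.reverseRecOn with
  | nil => rfl
  | append_singleton xs x ih =>
    have hsort : PySem.List.sorted (xs ++ [x]) PySem.Str.len true
        = PySem.List.insertBy (fun a b => decide (PySem.Str.len b < PySem.Str.len a)) x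
            (PySem.List.sorted xs PySem.Str.len true) := by
      rw [PySem.List.sorted_rev_eq_foldl_insertBy, PySem.List.sorted_rev_eq_foldl_insertBy,
        List.foldl_append]
      rfl
    rw [hsort, pvFind?_insertBy p x _ (PySem.List.sorted_pairwise_rev xs PySem.Str.len), ih]
    rcases hpx : p x with _ | _
    · rw [List.filter_append, show List.filter p [x] = [] by simp [hpx], List.append_nil]
      rcases hm : PySem.List.max? (xs.filter p) PySem.Str.len with _ | m
      · simp
      · simp only [hpx]
        split <;> rfl
    · rw [List.filter_append, show List.filter p [x] = [x] by simp [hpx]]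
      unfold PySem.List.max?
      rw [List.foldl_append]
      rcases hm : PySem.List.max? (xs.filter p) PySem.Str.len with _ | m <;>
        unfold PySem.List.max? at hm <;> rw [hm]
      · rfl
      · simp only [List.foldl_cons, List.foldl_nil, if_true]
        by_cases h : PySem.Str.len x ≤ PySem.Str.len m
        · rw [if_pos h, if_neg (by omega)]
        · rw [if_neg h, if_pos (by omega)]

-- find? with the constant-true predicate is head?
lemma pvFind?_true (l : List String) : List.find? (fun _ => true) l = l.head? := by
  cases l <;> simp [List.find?]
-- ===== VERDICT (by name: the statement is the Claim_ definition above) =====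
theorem prioritize_command_spec : Claim_equal_prioritize_command := by
  intro commands _
  unfold Spec_prioritize_command prioritize_command prioritize_command_alt
  have hfind := pvFind?_sortedRev pvIsD commands
  have hhead : (PySem.List.sorted commands PySem.Str.len true).head?
      = PySem.List.max? commands PySem.Str.len := by
    have := pvFind?_sortedRev (fun _ => true) commands
    rwa [pvFind?_true, List.filter_true] at this
  by_cases hnil : commands = []
  · subst hnil; rfl
  · rw [if_neg hnil]
    by_cases hp : commands.filter pvIsD = []
    · rw [if_neg (by simpa using hp)]
      rw [hp] at hfind
      obtain ⟨o, ho⟩ : ∃ o, PySem.List.max? commands PySem.Str.len = some o := by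
        rcases h : PySem.List.max? commands PySem.Str.len with _ | o
        · exact absurd ((PySem.List.max?_eq_none_iff commands PySem.Str.len).mp h) hnil
        · exact ⟨o, rfl⟩
      rw [ho] at hhead ⊢
      simp only [hfind, PySem.List.max?, List.foldl_nil]
      rcases hs : PySem.List.sorted commands PySem.Str.len true with _ | ⟨c, t⟩
      · exact absurd ((PySem.List.sorted_eq_nil_iff commands PySem.Str.len true).mp hs) hnil
      · rw [hs] at hhead
        simpa using hhead.symm
    · rw [if_pos (by simpa using hp)]
      obtain ⟨q, hq⟩ : ∃ q, PySem.List.max? (commands.filter pvIsD) PySem.Str.len = some q := by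
        rcases h : PySem.List.max? (commands.filter pvIsD) PySem.Str.len with _ | q
        · exact absurd ((PySem.List.max?_eq_none_iff _ PySem.Str.len).mp h) hp
        · exact ⟨q, rfl⟩
      rw [hq] at hfind
      simp [hfind, hq]
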